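-- pv_equiv track=rewrite | github.com/AslamJabri/Learning-Devops-AI | dsa-python/array/array_practise1.py | move_negative
-- ===== SOURCE A (Python) =====
-- def move_negative(arr):
--     positive = []
--     negative = []
--
--     for num in arr:
--         if num >= 0:
--             positive.append(num)
--         else:
--             negative.append(num)
--
--     return positive + negative
-- ===== SOURCE B (Python) =====
-- def move_negative(arr):
--     # Single stable sort: non-negatives (key False) come first, negatives (key True) after,
--     # each group keeping its original order -- same value as a two-list partition.
--     return sorted(arr, key=lambda x: x < 0)
-- ===== Notes on version B (the rewrite author's own statement) =====
-- stated objective: idiomatic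
-- what changed: Replaced the explicit two-accumulator partition loop with a single stable sort keyed on x < 0; stability makes the sorted result identical to positives-then-negatives in original order.
import Mathlib
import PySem

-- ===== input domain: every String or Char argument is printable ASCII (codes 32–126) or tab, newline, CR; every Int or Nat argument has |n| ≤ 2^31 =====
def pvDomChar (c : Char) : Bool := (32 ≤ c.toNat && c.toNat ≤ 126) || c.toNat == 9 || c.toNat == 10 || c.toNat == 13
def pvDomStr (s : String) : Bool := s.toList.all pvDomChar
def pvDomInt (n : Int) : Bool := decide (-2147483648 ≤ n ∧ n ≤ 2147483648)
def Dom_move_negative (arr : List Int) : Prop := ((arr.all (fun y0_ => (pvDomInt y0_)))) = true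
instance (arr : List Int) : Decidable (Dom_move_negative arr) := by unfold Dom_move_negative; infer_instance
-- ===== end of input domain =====

-- B replaces A's two-accumulator partition loop with one stable sort keyed on x < 0 (more idiomatic, same value).


-- ===== PORT A =====
-- literal port: one pass appending to 'positive' or 'negative', then positive + negative
def move_negative (arr : List Int) : List Int :=
  let s := arr.foldl (fun s num => if num ≥ 0 then (s.1 ++ [num], s.2) else (s.1, s.2 ++ [num])) ([], [])
  s.1 ++ s.2

-- ===== PORT B =====
-- literal port of Source B: sorted(arr, key=lambda x: x < 0); the bool key is encoded as 0/1 (False < True)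
def move_negative_alt (arr : List Int) : List Int :=
  PySem.List.sorted arr (fun x => if x < 0 then (1 : Int) else 0)

-- ===== PRECONDITION & SPEC =====
def Spec_move_negative (arr : List Int) (out : List Int) : Prop := out = move_negative_alt arr
instance (arr : List Int) (out : List Int) : Decidable (Spec_move_negative arr out) := by unfold Spec_move_negative; infer_instance

-- ===== CLAIM (what is proved, stated in full; the proofs are below) =====
def Claim_equal_move_negative : Prop := ∀ (arr : List Int), Dom_move_negative arr → Spec_move_negative arr (move_negative arr)

-- ===== LEMMAS AND PROOFS =====

def pvKey (x : Int) : Int := if x < 0 then 1 else 0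

def pvBefore (a b : Int) : Bool := decide (pvKey a < pvKey b)

-- inserting a non-negative element into (nonnegs ++ negs) lands right between the groups
theorem pv_insert_nonneg (P N : List Int) (x : Int)
    (hP : ∀ p ∈ P, 0 ≤ p) (hN : ∀ n ∈ N, n < 0) (hx : 0 ≤ x) :
    PySem.List.insertBy pvBefore x (P ++ N) = P ++ x :: N := by
  induction P with
  | nil =>
      cases N with
      | nil => simp [PySem.List.insertBy]
      | cons n N' =>
          have hn : n < 0 := hN n (by simp)
          simp [PySem.List.insertBy, pvBefore, pvKey, hn, not_lt.mpr hx]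
  | cons p P' ih =>
      have hp : 0 ≤ p := hP p (by simp)
      have : PySem.List.insertBy pvBefore x ((p :: P') ++ N)
          = p :: PySem.List.insertBy pvBefore x (P' ++ N) := by
        simp [PySem.List.insertBy, pvBefore, pvKey, not_lt.mpr hx, not_lt.mpr hp]
      rw [this, ih (fun q hq => hP q (by simp [hq]))]
      simp

-- inserting a negative element goes to the very end
theorem pv_insert_neg (L : List Int) (x : Int) (hx : x < 0) :
    PySem.List.insertBy pvBefore x L = L ++ [x] := by
  apply PySem.List.insertBy_of_forall_not_before
  intro y _
  by_cases hy : y < 0 <;> simp [pvBefore, pvKey, hx, hy]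

-- loop invariant: insertion-sorting into (nonnegs ++ negs) tracks A's pair of accumulators
theorem pv_invariant (arr : List Int) : ∀ (P N : List Int),
    (∀ p ∈ P, 0 ≤ p) → (∀ n ∈ N, n < 0) →
    arr.foldl (fun acc x => PySem.List.insertBy pvBefore x acc) (P ++ N)
      = (arr.foldl (fun s num => if num ≥ 0 then (s.1 ++ [num], s.2) else (s.1, s.2 ++ [num])) (P, N)).1
        ++ (arr.foldl (fun s num => if num ≥ 0 then (s.1 ++ [num], s.2) else (s.1, s.2 ++ [num])) (P, N)).2 := by
  induction arr with
  | nil => intro P N _ _; simp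
  | cons x arr' ih =>
      intro P N hP hN
      by_cases hx : 0 ≤ x
      · have h1 : PySem.List.insertBy pvBefore x (P ++ N) = (P ++ [x]) ++ N := by
          rw [pv_insert_nonneg P N x hP hN hx]; simp
        simp only [List.foldl_cons, hx, ge_iff_le, h1]
        exact ih (P ++ [x]) N
          (fun p hp => by rcases List.mem_append.mp hp with h | h
                          · exact hP p h
                          · simp at h; omega) hN
      · have hx' : x < 0 := by omega
        have h1 : PySem.List.insertBy pvBefore x (P ++ N) = P ++ (N ++ [x]) := by
          rw [pv_insert_neg (P ++ N) x hx']; simp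
        simp only [List.foldl_cons, ge_iff_le, if_neg hx, h1]
        exact ih P (N ++ [x]) hP
          (fun n hn => by rcases List.mem_append.mp hn with h | h
                          · exact hN n h
                          · simp at h; omega)

-- ===== VERDICT (by name: the statement is the Claim_ definition above) =====
theorem move_negative_spec : Claim_equal_move_negative := by
  intro arr _
  unfold Spec_move_negative move_negative move_negative_alt
  rw [PySem.List.sorted_eq_foldl_insertBy]
  have := pv_invariant arr [] [] (by simp) (by simp)
  simpa [pvBefore, pvKey] using this.symm
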